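-- pv_equiv track=rewrite | github.com/kimsj-git/Algorithm_Problem-solving | 프로그래머스/3/258709. 주사위 고르기/주사위 고르기.py | solution
-- ===== SOURCE A (Python) =====
-- from itertools import combinations
--
-- def solution(dice):
--     answer = []
--     max_win = 0
--     for comb in combinations(range(len(dice)), len(dice) // 2):
--         dices_a = [i for i in comb]
--         dices_b = [i for i in range(len(dice)) if i not in comb]
--
--         # a 주사위 세트의 합 빈도 구하기
--         first_dice_a = dice[dices_a[0]]
--         sums_count_a = {}
--         for dice_num in first_dice_a:
--             if sums_count_a.get(dice_num):
--                 sums_count_a[dice_num] += 1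
--             else:
--                 sums_count_a[dice_num] = 1
--         for dice_idx in dices_a[1:]:
--             dice_nums = dice[dice_idx]
--             updated_sums_count = {}
--             for dice_num in dice_nums:
--                 for prev_sum in sums_count_a.keys():
--                     if updated_sums_count.get(prev_sum + dice_num):
--                         updated_sums_count[prev_sum + dice_num] += sums_count_a[prev_sum]
--                     else:
--                         updated_sums_count[prev_sum + dice_num] = sums_count_a[prev_sum]
--             sums_count_a = updated_sums_count
--
--         # b 주사위 세트의 합 빈도 구하기
--         first_dice_b = dice[dices_b[0]]
--         sums_count_b = {}
--         for dice_num in first_dice_b: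
--             if sums_count_b.get(dice_num):
--                 sums_count_b[dice_num] += 1
--             else:
--                 sums_count_b[dice_num] = 1
--         for dice_idx in dices_b[1:]:
--             dice_nums = dice[dice_idx]
--             updated_sums_count = {}
--             for dice_num in dice_nums:
--                 for prev_sum in sums_count_b.keys():
--                     if updated_sums_count.get(prev_sum + dice_num):
--                         updated_sums_count[prev_sum + dice_num] += sums_count_b[prev_sum]
--                     else:
--                         updated_sums_count[prev_sum + dice_num] = sums_count_b[prev_sum]
--             sums_count_b = updated_sums_count
--
--         # a 주사위 세트의 승패 결과 계산
--         win = tie = lose = 0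
--         for sum_a, count_a in sums_count_a.items():
--             for sum_b, count_b in sums_count_b.items():
--                 count = count_a * count_b
--                 if sum_a > sum_b:
--                     win += count
--                 elif sum_a == sum_b:
--                     tie += count
--                 else:
--                     lose += count
--
--         # max_count와 비교하여 업데이트
--         if win > max_win:
--             answer = [i + 1 for i in dices_a]
--             max_win = win
--
--     return answer
-- ===== SOURCE B (Python) =====
-- from itertools import combinations
--
--
-- def _sum_counts(dice, idxs):
--     # frequency map of all attainable sums for the given dice indices
--     counts = {}
--     for v in dice[idxs[0]]:
--         counts[v] = counts.get(v, 0) + 1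
--     for i in idxs[1:]:
--         nxt = {}
--         for v in dice[i]:
--             for s in counts.keys():
--                 nxt[s + v] = nxt.get(s + v, 0) + counts[s]
--         counts = nxt
--     return counts
--
--
-- def _bisect_left(keys, x):
--     # hand-written bisect.bisect_left (A's module imports no bisect)
--     lo, hi = 0, len(keys)
--     while lo < hi:
--         mid = (lo + hi) // 2
--         if keys[mid] < x:
--             lo = mid + 1
--         else:
--             hi = mid
--     return lo
--
--
-- def solution(dice):
--     n = len(dice)
--     answer = []
--     max_win = 0
--     for comb in combinations(range(n), n // 2):
--         rest = [i for i in range(n) if i not in comb]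
--         counts_a = _sum_counts(dice, list(comb))
--         counts_b = _sum_counts(dice, rest)
--         # sort B's sums once, with prefix sums of their counts, so each
--         # A-sum needs only one binary search instead of a scan over all B-sums
--         items_b = sorted(counts_b.items(), key=lambda p: p[0])
--         keys_b = [s for s, _ in items_b]
--         prefix = [0]
--         for _, c in items_b:
--             prefix.append(prefix[-1] + c)
--         win = 0
--         for s, c in counts_a.items():
--             win += c * prefix[_bisect_left(keys_b, s)]
--         if win > max_win:
--             answer = [i + 1 for i in comb]
--             max_win = win
--     return answer
-- ===== Notes on version B (the rewrite author's own statement) =====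
-- stated objective: alternative
-- what changed: Per combination B sorts the complement set's sums once, builds prefix sums of their counts, and answers each a-sum with one binary search, replacing A's all-pairs win/tie/lose double loop over the two frequency tables.
import Mathlib
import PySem

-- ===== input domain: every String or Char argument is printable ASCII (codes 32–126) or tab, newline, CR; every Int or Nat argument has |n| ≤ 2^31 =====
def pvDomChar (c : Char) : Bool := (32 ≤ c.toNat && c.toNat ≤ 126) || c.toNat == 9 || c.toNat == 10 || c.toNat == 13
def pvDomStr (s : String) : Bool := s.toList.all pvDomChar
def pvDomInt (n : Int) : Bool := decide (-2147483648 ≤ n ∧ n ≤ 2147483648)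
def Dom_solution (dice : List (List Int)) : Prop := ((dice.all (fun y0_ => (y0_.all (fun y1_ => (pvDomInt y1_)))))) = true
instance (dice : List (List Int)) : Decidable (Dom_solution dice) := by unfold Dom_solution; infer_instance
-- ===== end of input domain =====

-- B replaces A's all-pairs win-count pass (every a-sum against every b-sum) by sorting the
-- b-sums once with prefix-summed counts and one binary search per a-sum.


-- ===== PORT A =====
-- A's duplicated "sum-frequency of a dice set" block, written once and used for both sets.
-- first pass: frequency of the faces of the first die ('if sums_count.get(v): += 1 else = 1';
-- Python's truthiness 'get(v)' is 'stored value present and nonzero', i.e. getD v 0 ≠ 0)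
def aBuildFirst (first : List Int) : PySem.Dict Int Int :=
  first.foldl
    (fun d v => if d.getD v 0 ≠ 0 then d.insert v (d.getD v 0 + 1) else d.insert v 1)
    PySem.Dict.empty

-- one 'for dice_idx in dices[1:]' step: convolve the current sum counts with die dice_idx
-- (dice[dice_idx] and sums_count[prev_sum] are always in range/present; pyGetD/getD are exact here)
def aConv (dice : List (List Int)) (cur : PySem.Dict Int Int) (diceIdx : Int) : PySem.Dict Int Int :=
  (PySem.List.pyGetD dice diceIdx []).foldl
    (fun upd v =>
      cur.keys.foldl
        (fun upd p =>
          if upd.getD (p + v) 0 ≠ 0 then upd.insert (p + v) (upd.getD (p + v) 0 + cur.getD p 0)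
          else upd.insert (p + v) (cur.getD p 0))
        upd)
    PySem.Dict.empty

def aSumCounts (dice : List (List Int)) (idxs : List Int) : PySem.Dict Int Int :=
  match idxs with
  | [] => PySem.Dict.empty   -- Python raises IndexError on idxs[0]; unreachable under Pre_solution
  | i0 :: rest => rest.foldl (aConv dice) (aBuildFirst (PySem.List.pyGetD dice i0 []))

-- the win/tie/lose double loop over the two items() lists
def aWinLoop (ca cb : PySem.Dict Int Int) : Int × Int × Int :=
  ca.items.foldl
    (fun s pa =>
      cb.items.foldl
        (fun s pb =>
          let c := pa.2 * pb.2
          if pa.1 > pb.1 then (s.1 + c, s.2.1, s.2.2)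
          else if pa.1 = pb.1 then (s.1, s.2.1 + c, s.2.2)
          else (s.1, s.2.1, s.2.2 + c))
        s)
    (0, 0, 0)

def solution (dice : List (List Int)) : List Int :=
  let n : Int := PySem.List.len dice
  (((PySem.List.combinations (PySem.List.pyRange 0 n 1) (dice.length / 2)).foldl
    (fun st comb =>
      let dicesA := comb                                                 -- [i for i in comb]
      let dicesB := (PySem.List.pyRange 0 n 1).filter (fun i => !(comb.contains i))
      let countsA := aSumCounts dice dicesA
      let countsB := aSumCounts dice dicesB
      let wtl := aWinLoop countsA countsB
      if wtl.1 > st.2 then (dicesA.map (· + 1), wtl.1) else st)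
    (([] : List Int), (0 : Int)))).1

-- ===== PORT B =====
-- B's _sum_counts helper ('counts[v] = counts.get(v, 0) + 1' / 'nxt[s+v] = nxt.get(s+v,0) + counts[s]')
def bSumCounts (dice : List (List Int)) (idxs : List Int) : PySem.Dict Int Int :=
  match idxs with
  | [] => PySem.Dict.empty   -- Python raises IndexError on idxs[0]; unreachable under Pre_solution
  | i0 :: rest =>
    rest.foldl
      (fun cur i =>
        (PySem.List.pyGetD dice i []).foldl
          (fun nxt v =>
            cur.keys.foldl
              (fun nxt s => nxt.insert (s + v) (nxt.getD (s + v) 0 + cur.getD s 0))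
              nxt)
          PySem.Dict.empty)
      ((PySem.List.pyGetD dice i0 []).foldl
        (fun d v => d.insert v (d.getD v 0 + 1)) PySem.Dict.empty)

-- Source B's hand-written _bisect_left IS CPython's bisect.bisect_left (same lo/hi/mid loop);
-- ported as the prelude primitive PySem.List.bisectLeft
def solution_alt (dice : List (List Int)) : List Int :=
  let n : Int := PySem.List.len dice
  (((PySem.List.combinations (PySem.List.pyRange 0 n 1) (dice.length / 2)).foldl
    (fun st comb =>
      let rest := (PySem.List.pyRange 0 n 1).filter (fun i => !(comb.contains i))
      let countsA := bSumCounts dice comb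
      let countsB := bSumCounts dice rest
      let itemsB := PySem.List.sorted countsB.items (fun p => p.1)
      let keysB := itemsB.map (fun p => p.1)
      let pref := itemsB.foldl
        (fun pre p => pre ++ [PySem.List.pyGetD pre (-1) 0 + p.2]) [(0 : Int)]
      let win := countsA.items.foldl
        (fun w p => w + p.2 * PySem.List.pyGetD pref ((PySem.List.bisectLeft keysB p.1 : Nat) : Int) 0) 0
      if win > st.2 then (comb.map (· + 1), win) else st)
    (([] : List Int), (0 : Int)))).1

-- ===== PRECONDITION & SPEC =====
-- Pre_: with fewer than two dice the chosen set (size len//2) or its complement is empty and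
-- both A and B raise IndexError on idxs[0].
def Pre_solution (dice : List (List Int)) : Prop := 2 ≤ dice.length
instance (dice : List (List Int)) : Decidable (Pre_solution dice) := by unfold Pre_solution; infer_instance
def pvWitness_solution : List (List Int) := [[1], [2]]

def Spec_solution (dice : List (List Int)) (out : List Int) : Prop := out = solution_alt dice
instance (dice : List (List Int)) (out : List Int) : Decidable (Spec_solution dice out) := by unfold Spec_solution; infer_instance

-- ===== CLAIM (what is proved, stated in full; the proofs are below) =====
def Claim_equal_solution : Prop := ∀ (dice : List (List Int)), Dom_solution dice → Pre_solution dice → Spec_solution dice (solution dice)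

-- ===== LEMMAS AND PROOFS =====

-- A's conditional insert and B's get-with-default insert build the same dict
lemma dictStep (d : PySem.Dict Int Int) (v k : Int) :
    (if d.getD v 0 ≠ 0 then d.insert v (d.getD v 0 + k) else d.insert v k)
      = d.insert v (d.getD v 0 + k) := by
  by_cases h : d.getD v 0 = 0 <;> simp [h]

lemma sumCounts_eq (dice : List (List Int)) (idxs : List Int) :
    aSumCounts dice idxs = bSumCounts dice idxs := by
  cases idxs with
  | nil => rfl
  | cons i0 rest =>
    have hfirst : (fun (d : PySem.Dict Int Int) v =>
        if d.getD v 0 ≠ 0 then d.insert v (d.getD v 0 + 1) else d.insert v 1)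
        = fun d v => d.insert v (d.getD v 0 + 1) := by
      funext d v; exact dictStep d v 1
    have hconv : aConv dice = fun cur i =>
        (PySem.List.pyGetD dice i []).foldl
          (fun nxt v =>
            cur.keys.foldl
              (fun nxt s => nxt.insert (s + v) (nxt.getD (s + v) 0 + cur.getD s 0))
              nxt)
          PySem.Dict.empty := by
      funext cur i
      unfold aConv
      congr 1
      funext nxt v
      congr 1
      funext upd p
      exact dictStep upd (p + v) (cur.getD p 0)
    simp only [aSumCounts, bSumCounts, aBuildFirst, hfirst, hconv]

-- the inner b-loop of A's win computation, first component
lemma aWinInner (items : List (Int × Int)) (pa : Int × Int) (s : Int × Int × Int) :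
    (items.foldl
      (fun s pb =>
        let c := pa.2 * pb.2
        if pa.1 > pb.1 then (s.1 + c, s.2.1, s.2.2)
        else if pa.1 = pb.1 then (s.1, s.2.1 + c, s.2.2)
        else (s.1, s.2.1, s.2.2 + c)) s).1
      = s.1 + (items.map (fun pb => if pb.1 < pa.1 then pa.2 * pb.2 else 0)).sum := by
  induction items generalizing s with
  | nil => simp
  | cons pb t ih =>
    simp only [List.foldl_cons, List.map_cons, List.sum_cons]
    rw [ih]
    rcases lt_trichotomy pb.1 pa.1 with h | h | h
    · simp only [gt_iff_lt, h, if_pos]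
      ring
    · simp [h]
    · have h1 : ¬ pa.1 > pb.1 := by omega
      have h2 : ¬ pa.1 = pb.1 := by omega
      have h3 : ¬ pb.1 < pa.1 := by omega
      simp [h1, h2]

lemma aWinLoop_fst (ca cb : PySem.Dict Int Int) :
    (aWinLoop ca cb).1
      = (ca.items.map (fun pa =>
          (cb.items.map (fun pb => if pb.1 < pa.1 then pa.2 * pb.2 else 0)).sum)).sum := by
  unfold aWinLoop
  generalize ca.items = l
  have h : ∀ (s : Int × Int × Int),
      (l.foldl (fun s pa =>
        cb.items.foldl
          (fun s pb =>
            let c := pa.2 * pb.2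
            if pa.1 > pb.1 then (s.1 + c, s.2.1, s.2.2)
            else if pa.1 = pb.1 then (s.1, s.2.1 + c, s.2.2)
            else (s.1, s.2.1, s.2.2 + c)) s) s).1
        = s.1 + (l.map (fun pa =>
            (cb.items.map (fun pb => if pb.1 < pa.1 then pa.2 * pb.2 else 0)).sum)).sum := by
    induction l with
    | nil => simp
    | cons pa t ih =>
      intro s
      simp only [List.foldl_cons, List.map_cons, List.sum_cons]
      rw [ih, aWinInner]
      ring
  rw [h (0, 0, 0)]
  simp

-- running partial sums of the counts (snd components)
def partialSums (a : Int) : List (Int × Int) → List Int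
  | [] => []
  | p :: t => (a + p.2) :: partialSums (a + p.2) t

lemma prefix_build (l : List (Int × Int)) (pre : List Int) (a : Int) :
    l.foldl (fun pre p => pre ++ [PySem.List.pyGetD pre (-1) 0 + p.2]) (pre ++ [a])
      = (pre ++ [a]) ++ partialSums a l := by
  induction l generalizing pre a with
  | nil => simp [partialSums]
  | cons p t ih =>
    simp only [List.foldl_cons, PySem.List.pyGetD_neg_one_append_singleton, partialSums]
    have := ih (pre ++ [a]) (a + p.2)
    simp only [List.append_assoc, List.singleton_append] at this ⊢
    exact this

lemma partialSums_getD (l : List (Int × Int)) (a : Int) (r : Nat) (hr : r ≤ l.length) :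
    (a :: partialSums a l).getD r 0 = a + ((l.take r).map (·.2)).sum := by
  induction l generalizing a r with
  | nil =>
    simp only [List.length_nil, Nat.le_zero] at hr
    subst hr; simp
  | cons p t ih =>
    cases r with
    | zero => simp
    | succ r =>
      simp only [partialSums, List.getD_cons_succ, List.take_succ_cons, List.map_cons,
        List.sum_cons]
      rw [ih (a + p.2) r (by simpa using hr)]
      ring

-- if p holds exactly on the first r positions, filter is take r
lemma filter_eq_take {α : Type} (l : List α) (p : α → Bool) (r : Nat) (hr : r ≤ l.length)
    (h1 : ∀ j (hj : j < l.length), j < r → p l[j])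
    (h2 : ∀ j (hj : j < l.length), r ≤ j → ¬ p l[j]) :
    l.filter p = l.take r := by
  conv_lhs => rw [← List.take_append_drop r l]
  rw [List.filter_append]
  have ht : (l.take r).filter p = l.take r := by
    rw [List.filter_eq_self]
    intro x hx
    obtain ⟨j, hj, hje⟩ := List.getElem_of_mem hx
    simp only [List.length_take] at hj
    rw [List.getElem_take] at hje
    rw [← hje]
    exact h1 j (by omega) (by omega)
  have hd : (l.drop r).filter p = [] := by
    rw [List.filter_eq_nil_iff]
    intro x hx
    obtain ⟨j, hj, hje⟩ := List.getElem_of_mem hx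
    simp only [List.length_drop] at hj
    rw [List.getElem_drop] at hje
    rw [← hje]
    exact h2 (r + j) (by omega) (by omega)
  rw [ht, hd, List.append_nil]

-- sum of an if-then-else map equals the factored filtered sum
lemma sum_ite_mul (l : List (Int × Int)) (x c : Int) :
    (l.map (fun pb => if pb.1 < x then c * pb.2 else 0)).sum
      = c * ((l.filter (fun pb => pb.1 < x)).map (·.2)).sum := by
  induction l with
  | nil => simp
  | cons p t ih =>
    by_cases h : p.1 < x
    · simp [h, ih]; ring
    · simp [h, ih]

-- B's per-a-sum term: count·(prefix value at the bisect point) = A's inner sum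
lemma per_item_eq (cb : PySem.Dict Int Int) (x c : Int) :
    c * PySem.List.pyGetD
          ((PySem.List.sorted cb.items (fun p => p.1)).foldl
            (fun pre p => pre ++ [PySem.List.pyGetD pre (-1) 0 + p.2]) [(0 : Int)])
          ((PySem.List.bisectLeft ((PySem.List.sorted cb.items (fun p => p.1)).map (fun p => p.1)) x : Nat) : Int) 0
      = (cb.items.map (fun pb => if pb.1 < x then c * pb.2 else 0)).sum := by
  set itemsB := PySem.List.sorted cb.items (fun p => p.1) with hitems
  set keysB := itemsB.map (fun p => p.1) with hkeys
  set r := PySem.List.bisectLeft keysB x with hrdef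
  have hsortedkeys : keysB.Pairwise (· ≤ ·) := by
    rw [hkeys]
    exact List.pairwise_map.mpr (PySem.List.sorted_pairwise cb.items (fun p => p.1))
  obtain ⟨hr_le, hlt, hge⟩ := PySem.List.bisectLeft_spec keysB x hsortedkeys
  have hlen : keysB.length = itemsB.length := by simp [hkeys]
  -- the prefix list at index r is the sum of the first r counts
  have hpre : PySem.List.pyGetD
      (itemsB.foldl (fun pre p => pre ++ [PySem.List.pyGetD pre (-1) 0 + p.2]) [(0 : Int)]) ((r : Nat) : Int) 0
      = ((itemsB.take r).map (·.2)).sum := by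
    have hb := prefix_build itemsB [] 0
    simp only [List.nil_append] at hb
    rw [hb, PySem.List.pyGetD_natCast]
    have := partialSums_getD itemsB 0 r (by omega)
    simpa using this
  -- filter (key < x) on the sorted list is exactly take r
  have hfil : itemsB.filter (fun pb => pb.1 < x) = itemsB.take r := by
    apply filter_eq_take itemsB _ r (by omega)
    · intro j hj hjr
      have := hlt j (by omega) hjr
      simp only [hkeys, List.getElem_map] at this
      simpa using this
    · intro j hj hjr
      have := hge j (by omega) hjr
      simp only [hkeys, List.getElem_map] at this
      simp only [decide_eq_true_eq]
      omega
  rw [hpre, ← hfil]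
  -- move from the sorted list back to cb.items (a permutation) and factor out c
  have hperm : itemsB.Perm cb.items := PySem.List.sorted_perm cb.items (fun p => p.1) false
  rw [sum_ite_mul]
  congr 1
  exact List.Perm.sum_eq (List.Perm.map _ (List.Perm.filter _ hperm))

-- per-combination equality of the two win computations
lemma win_eq (ca cb : PySem.Dict Int Int) :
    (ca.items.foldl
      (fun w p => w + p.2 * PySem.List.pyGetD
        ((PySem.List.sorted cb.items (fun p => p.1)).foldl
          (fun pre p => pre ++ [PySem.List.pyGetD pre (-1) 0 + p.2]) [(0 : Int)])
        ((PySem.List.bisectLeft ((PySem.List.sorted cb.items (fun p => p.1)).map (fun p => p.1)) p.1 : Nat) : Int) 0) 0)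
      = (aWinLoop ca cb).1 := by
  rw [aWinLoop_fst, PySem.List.foldl_add]
  simp only [zero_add]
  congr 1
  apply List.map_congr_left
  intro pa _
  rw [per_item_eq cb pa.1 pa.2]

-- ===== VERDICT (by name: the statement is the Claim_ definition above) =====
theorem solution_spec : Claim_equal_solution := by
  intro dice _ _
  unfold Spec_solution solution solution_alt
  dsimp only
  refine congrArg Prod.fst (PySem.List.foldl_congr_mem _ _ _ _ ?_)
  intro st comb _
  simp only [sumCounts_eq, win_eq]
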